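-- pv_equiv track=rewrite | github.com/kjin67511/morning-pi | weather/weather_query.py | get_basehour_for_forecast
-- ===== SOURCE A (Python) =====
-- def get_basehour_for_forecast(current_hour):
--     base_hours_for_forecast = (2, 5, 8, 11, 14, 17, 20, 23)
--     base_hour = -1
--
--     if current_hour < 2 or current_hour >= 23:
--         base_hour = 23
--     else:
--         for h in reversed(base_hours_for_forecast):
--             if current_hour >= h:
--                 base_hour = h
--                 break
--
--     return base_hour
-- ===== SOURCE B (Python) =====
-- def get_basehour_for_forecast(current_hour):
--     if current_hour < 2 or current_hour >= 23:
--         return 23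
--     base_hours_for_forecast = (2, 5, 8, 11, 14, 17, 20, 23)
--     return base_hours_for_forecast[(current_hour - 2) // 3]
-- ===== Notes on version B (the rewrite author's own statement) =====
-- stated objective: simpler
-- what changed: Replaced the reversed linear scan over the base hours with a closed-form arithmetic index into the tuple, exploiting that the base hours form an arithmetic progression.
import Mathlib
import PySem

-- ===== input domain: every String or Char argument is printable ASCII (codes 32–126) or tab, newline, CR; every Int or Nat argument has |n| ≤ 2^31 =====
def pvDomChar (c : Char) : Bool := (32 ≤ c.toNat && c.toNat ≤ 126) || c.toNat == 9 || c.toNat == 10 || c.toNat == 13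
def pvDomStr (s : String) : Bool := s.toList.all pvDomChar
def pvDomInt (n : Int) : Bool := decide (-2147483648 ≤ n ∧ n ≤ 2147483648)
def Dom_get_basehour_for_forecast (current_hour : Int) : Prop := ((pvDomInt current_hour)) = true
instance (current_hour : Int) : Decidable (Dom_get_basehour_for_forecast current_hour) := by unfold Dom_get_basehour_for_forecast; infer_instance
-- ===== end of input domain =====

-- ===== PORT A =====
-- Loop over reversed base hours with break, transliterated as first-match recursion.
def pvScanA (current_hour : Int) : List Int → Int
  | [] => -1
  | h :: rest => if current_hour ≥ h then h else pvScanA current_hour rest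

def get_basehour_for_forecast (current_hour : Int) : Int :=
  if current_hour < 2 ∨ current_hour ≥ 23 then 23
  else pvScanA current_hour ([2, 5, 8, 11, 14, 17, 20, 23].reverse)

-- ===== PORT B =====
-- B: closed-form arithmetic index into the base-hour tuple.
def get_basehour_for_forecast_alt (current_hour : Int) : Int :=
  if current_hour < 2 ∨ current_hour ≥ 23 then 23
  else PySem.List.pyGetD ([2, 5, 8, 11, 14, 17, 20, 23] : List Int) (PySem.Int.floordiv (current_hour - 2) 3) (-1)

-- ===== PRECONDITION & SPEC =====
def Spec_get_basehour_for_forecast (current_hour : Int) (out : Int) : Prop := out = get_basehour_for_forecast_alt current_hour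
instance (current_hour : Int) (out : Int) : Decidable (Spec_get_basehour_for_forecast current_hour out) := by unfold Spec_get_basehour_for_forecast; infer_instance

-- ===== CLAIM (what is proved, stated in full; the proofs are below) =====
def Claim_equal_get_basehour_for_forecast : Prop := ∀ (current_hour : Int), Dom_get_basehour_for_forecast current_hour → Spec_get_basehour_for_forecast current_hour (get_basehour_for_forecast current_hour)

-- ===== LEMMAS AND PROOFS =====

-- ===== VERDICT (by name: the statement is the Claim_ definition above) =====
theorem get_basehour_for_forecast_spec : Claim_equal_get_basehour_for_forecast := by
  intro h _
  unfold Spec_get_basehour_for_forecast get_basehour_for_forecast get_basehour_for_forecast_alt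
  by_cases hc : h < 2 ∨ h ≥ 23
  · rw [if_pos hc, if_pos hc]
  · have h2 : 2 ≤ h := by omega
    have h23 : h < 23 := by omega
    rw [if_neg hc, if_neg hc]
    interval_cases h <;> decide
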